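-- pv_equiv track=rewrite | github.com/iamvaibhavrai/Combinatorial-Game-Theory | Grundy Nummber/Naive Approach/solution3.py | calculateGrundy
-- ===== SOURCE A (Python) =====
-- def calculateMex(l):
--     mex = 0
--     while True:
--         if mex in l:
--             mex += 1
--         else:
--             return mex
--
-- def calculateGrundy(n):
--     if n == 0:
--         return 0
--
--     l = []
--     l.append(calculateGrundy(n//2))
--     l.append(calculateGrundy(n//3))
--     l.append(calculateGrundy(n//6))
--     return calculateMex(l)
-- ===== SOURCE B (Python) =====
-- def _table(m):
--     # Grundy values on the base segment 0 <= m < 72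
--     if m < 1:
--         return 0
--     if m < 2:
--         return 1
--     if m < 4:
--         return 2
--     if m < 6:
--         return 3
--     if m < 12:
--         return 0
--     if m < 24:
--         return 1
--     if m < 48:
--         return 2
--     return 3
--
-- def calculateGrundy(n):
--     # The segments [6*12^k*2^j, ...) on which the Grundy value is constant scale
--     # exactly by 12, so repeatedly dividing by 12 reduces n to the base segment.
--     while n >= 72:
--         n //= 12
--     return _table(n)
-- ===== Notes on version B (the rewrite author's own statement) =====
-- stated objective: faster
-- what changed: Replaces the exponential triple recursion with mex by a closed-form segment lookup: divide n by 12 until it is below 72, then read the Grundy value off a constant 8-branch table (the Grundy segments scale exactly by 12).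
import Mathlib
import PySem

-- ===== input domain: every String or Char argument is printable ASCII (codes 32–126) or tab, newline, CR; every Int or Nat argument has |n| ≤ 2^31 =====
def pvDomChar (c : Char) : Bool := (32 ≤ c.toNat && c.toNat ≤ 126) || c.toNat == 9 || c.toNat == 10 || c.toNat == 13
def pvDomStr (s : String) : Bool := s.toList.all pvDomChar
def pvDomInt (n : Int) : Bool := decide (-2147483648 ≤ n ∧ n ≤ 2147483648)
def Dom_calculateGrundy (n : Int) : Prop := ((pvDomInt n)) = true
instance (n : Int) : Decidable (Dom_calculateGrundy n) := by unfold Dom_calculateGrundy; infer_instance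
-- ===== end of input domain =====

-- B replaces A's exponential mex-recursion by a divide-by-12 segment lookup (objective: faster).
-- A raises RecursionError for n < 0 (n//2 never reaches 0); Pre_ excludes those inputs.

-- ===== PORT A =====
-- while-loop of calculateMex, step for step; fuel l.length+1 bounds the at most
-- l.length+1 iterations (mex can only be incremented while it is still in l)
def calculateMexGo (l : List Int) (fuel : Nat) (mex : Int) : Int :=
  match fuel with
  | 0 => mex
  | f + 1 => if l.contains mex then calculateMexGo l f (mex + 1) else mex

def calculateMex (l : List Int) : Int := calculateMexGo l (l.length + 1) 0

-- A's recursion, with fuel n.toNat+1 as the totality device (each recursive call at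
-- least halves a positive n, so the fuel is never exhausted on 0 ≤ n).  For n < 0 the
-- Python recurses forever (RecursionError) — those inputs are outside Pre_ below, and
-- the port returns 0 there (the 'n ≤ 0' guard only makes the same computation total).
def calcAGo (fuel : Nat) (n : Int) : Int :=
  match fuel with
  | 0 => 0
  | f + 1 =>
    if n ≤ 0 then 0
    else
      calculateMex [calcAGo f (PySem.Int.floordiv n 2),
                    calcAGo f (PySem.Int.floordiv n 3),
                    calcAGo f (PySem.Int.floordiv n 6)]

def calculateGrundy (n : Int) : Int := calcAGo (n.toNat + 1) n

-- ===== PORT B =====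
-- B's base-segment table (0 ≤ m < 72), the if-chain of _table in Source B
def grundyTable (m : Int) : Int :=
  if m < 1 then 0
  else if m < 2 then 1
  else if m < 4 then 2
  else if m < 6 then 3
  else if m < 12 then 0
  else if m < 24 then 1
  else if m < 48 then 2
  else 3

-- Source B's while loop 'while n >= 72: n //= 12'; fuel n.toNat+1 is ample
def reduceGo (fuel : Nat) (n : Int) : Int :=
  match fuel with
  | 0 => n
  | f + 1 => if 72 ≤ n then reduceGo f (PySem.Int.floordiv n 12) else n

def calculateGrundy_alt (n : Int) : Int := grundyTable (reduceGo (n.toNat + 1) n)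

-- ===== PRECONDITION & SPEC =====
-- Pre_ excludes n < 0, on which the Python A recurses forever (RecursionError)
def Pre_calculateGrundy (n : Int) : Prop := 0 ≤ n
instance (n : Int) : Decidable (Pre_calculateGrundy n) := by unfold Pre_calculateGrundy; infer_instance
def pvWitness_calculateGrundy : Int := (36)

def Spec_calculateGrundy (n : Int) (out : Int) : Prop := out = calculateGrundy_alt n
instance (n : Int) (out : Int) : Decidable (Spec_calculateGrundy n out) := by unfold Spec_calculateGrundy; infer_instance

-- ===== CLAIM (what is proved, stated in full; the proofs are below) =====
def Claim_equal_calculateGrundy : Prop := ∀ (n : Int), Dom_calculateGrundy n → Pre_calculateGrundy n → Spec_calculateGrundy n (calculateGrundy n)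

-- ===== LEMMAS AND PROOFS =====

theorem fd_nonneg (n d : Int) (_hn : 0 ≤ n) (hd : 0 < d) :
    PySem.Int.floordiv n d = n / d := PySem.Int.floordiv_eq_ediv_of_pos hd

theorem toNat_fd_lt (n d : Int) (hn : 1 ≤ n) (hd : 2 ≤ d) :
    (PySem.Int.floordiv n d).toNat < n.toNat := by
  have h1 : PySem.Int.floordiv n d < n :=
    (PySem.Int.floordiv_lt_iff_lt_mul (by omega)).mpr (by nlinarith)
  have h2 : (0:Int) ≤ PySem.Int.floordiv n d :=
    (PySem.Int.le_floordiv_iff_mul_le (by omega)).mpr (by omega)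
  omega

theorem reduceGo_irrel (f1 : Nat) : ∀ (f2 : Nat) (n : Int), n.toNat < f1 → n.toNat < f2 →
    reduceGo f1 n = reduceGo f2 n := by
  induction f1 with
  | zero => intro f2 n h; omega
  | succ g ih =>
    intro f2 n h1 h2
    match f2, h2 with
    | h + 1, _ =>
      simp only [reduceGo]
      by_cases hc : 72 ≤ n
      · simp only [hc, if_true]
        exact ih h _ (by have := toNat_fd_lt n 12 (by omega) (by omega); omega)
          (by have := toNat_fd_lt n 12 (by omega) (by omega); omega)
      · simp [hc]

theorem calcAGo_irrel (f1 : Nat) : ∀ (f2 : Nat) (n : Int), n.toNat < f1 → n.toNat < f2 →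
    calcAGo f1 n = calcAGo f2 n := by
  induction f1 with
  | zero => intro f2 n h; omega
  | succ g ih =>
    intro f2 n h1 h2
    match f2, h2 with
    | h + 1, _ =>
      simp only [calcAGo]
      by_cases hc : n ≤ 0
      · simp [hc]
      · simp only [hc, if_false]
        have l2 := toNat_fd_lt n 2 (by omega) (by omega)
        have l3 := toNat_fd_lt n 3 (by omega) (by omega)
        have l6 := toNat_fd_lt n 6 (by omega) (by omega)
        rw [ih h _ (by omega) (by omega), ih h _ (by omega) (by omega),
            ih h _ (by omega) (by omega)]

-- A's recurrence at positive n
theorem calcA_rec (n : Int) (hn : 1 ≤ n) :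
    calculateGrundy n =
      calculateMex [calculateGrundy (PySem.Int.floordiv n 2),
                    calculateGrundy (PySem.Int.floordiv n 3),
                    calculateGrundy (PySem.Int.floordiv n 6)] := by
  have l2 := toNat_fd_lt n 2 (by omega) (by omega)
  have l3 := toNat_fd_lt n 3 (by omega) (by omega)
  have l6 := toNat_fd_lt n 6 (by omega) (by omega)
  show calcAGo (n.toNat + 1) n = _
  simp only [calcAGo, show ¬ n ≤ 0 by omega, if_false]
  unfold calculateGrundy
  rw [calcAGo_irrel n.toNat ((PySem.Int.floordiv n 2).toNat + 1) _ (by omega) (by omega),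
      calcAGo_irrel n.toNat ((PySem.Int.floordiv n 3).toNat + 1) _ (by omega) (by omega),
      calcAGo_irrel n.toNat ((PySem.Int.floordiv n 6).toNat + 1) _ (by omega) (by omega)]

-- B's reduction step: above 72 the reduced value is that of n // 12
theorem alt_step (n : Int) (hn : 72 ≤ n) :
    calculateGrundy_alt n = calculateGrundy_alt (PySem.Int.floordiv n 12) := by
  have l12 := toNat_fd_lt n 12 (by omega) (by omega)
  unfold calculateGrundy_alt
  congr 1
  calc reduceGo (n.toNat + 1) n
      = reduceGo n.toNat (PySem.Int.floordiv n 12) := by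
        show (if 72 ≤ n then reduceGo n.toNat (PySem.Int.floordiv n 12) else n) = _
        simp [hn]
    _ = reduceGo ((PySem.Int.floordiv n 12).toNat + 1) (PySem.Int.floordiv n 12) :=
        reduceGo_irrel n.toNat _ _ (by omega) (by omega)

-- the base-range recurrence of B, checkable by evaluation
def altRecNat (m : Nat) : Bool :=
  (m == 0) ||
    (calculateMex [calculateGrundy_alt (PySem.Int.floordiv (m : Int) 2),
                   calculateGrundy_alt (PySem.Int.floordiv (m : Int) 3),
                   calculateGrundy_alt (PySem.Int.floordiv (m : Int) 6)] ==
      calculateGrundy_alt (m : Int))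

set_option maxRecDepth 40000 in
set_option maxHeartbeats 2000000 in
theorem altRec_small : ∀ m : Nat, m < 432 → altRecNat m = true := by decide

-- nested floor divisions compose for nonnegative n
theorem fd_fd (n a b : Int) (hn : 0 ≤ n) (ha : 0 < a) (hb : 0 < b) :
    PySem.Int.floordiv (PySem.Int.floordiv n a) b = PySem.Int.floordiv n (a * b) := by
  have h1 : 0 ≤ PySem.Int.floordiv n a := by
    rw [fd_nonneg n a hn ha]; positivity
  rw [fd_nonneg _ b h1 hb, fd_nonneg n a hn ha, fd_nonneg n (a * b) hn (by positivity)]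
  exact Int.ediv_ediv_of_nonneg (le_of_lt ha)

-- B satisfies A's mex-recurrence everywhere on the nonnegative integers
theorem alt_rec (n : Int) (hn : 1 ≤ n) :
    calculateMex [calculateGrundy_alt (PySem.Int.floordiv n 2),
                  calculateGrundy_alt (PySem.Int.floordiv n 3),
                  calculateGrundy_alt (PySem.Int.floordiv n 6)] =
      calculateGrundy_alt n := by
  induction hN : n.toNat using Nat.strong_induction_on generalizing n with
  | _ N ih =>
  by_cases hsmall : n < 432
  · have h := altRec_small n.toNat (by omega)
    unfold altRecNat at h
    rw [show ((n.toNat : Nat) : Int) = n by omega] at h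
    simp only [Bool.or_eq_true, beq_iff_eq] at h
    exact h.resolve_left (by omega)
  · -- n ≥ 432: reduce every entry by 12 and use the induction hypothesis at n // 12
    have h2 : PySem.Int.floordiv n 2 ≥ 72 := by
      rw [fd_nonneg n 2 (by omega) (by omega)]; omega
    have h3 : PySem.Int.floordiv n 3 ≥ 72 := by
      rw [fd_nonneg n 3 (by omega) (by omega)]; omega
    have h6 : PySem.Int.floordiv n 6 ≥ 72 := by
      rw [fd_nonneg n 6 (by omega) (by omega)]; omega
    have h12 : 1 ≤ PySem.Int.floordiv n 12 := by
      rw [fd_nonneg n 12 (by omega) (by omega)]; omega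
    rw [alt_step _ h2, alt_step _ h3, alt_step _ h6,
        fd_fd n 2 12 (by omega) (by omega) (by omega),
        fd_fd n 3 12 (by omega) (by omega) (by omega),
        fd_fd n 6 12 (by omega) (by omega) (by omega),
        alt_step n (by omega)]
    have hlt : (PySem.Int.floordiv n 12).toNat < N := by
      have := toNat_fd_lt n 12 (by omega) (by omega); omega
    have := ih _ hlt (PySem.Int.floordiv n 12) h12 rfl
    rw [fd_fd n 12 2 (by omega) (by omega) (by omega),
        fd_fd n 12 3 (by omega) (by omega) (by omega),
        fd_fd n 12 6 (by omega) (by omega) (by omega)] at this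
    rw [show (12 : Int) * 2 = 2 * 12 by ring, show (12 : Int) * 3 = 3 * 12 by ring,
        show (12 : Int) * 6 = 6 * 12 by ring] at this
    exact this

theorem main_eq (n : Int) (hn : 0 ≤ n) : calculateGrundy n = calculateGrundy_alt n := by
  induction hN : n.toNat using Nat.strong_induction_on generalizing n with
  | _ N ih =>
  by_cases h0 : n = 0
  · subst h0; decide
  · have hn1 : 1 ≤ n := by omega
    have l2 := toNat_fd_lt n 2 (by omega) (by omega)
    have l3 := toNat_fd_lt n 3 (by omega) (by omega)
    have l6 := toNat_fd_lt n 6 (by omega) (by omega)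
    have p2 : (0:Int) ≤ PySem.Int.floordiv n 2 := by
      rw [fd_nonneg n 2 (by omega) (by omega)]; positivity
    have p3 : (0:Int) ≤ PySem.Int.floordiv n 3 := by
      rw [fd_nonneg n 3 (by omega) (by omega)]; positivity
    have p6 : (0:Int) ≤ PySem.Int.floordiv n 6 := by
      rw [fd_nonneg n 6 (by omega) (by omega)]; positivity
    rw [calcA_rec n hn1,
        ih _ (by omega) _ p2 rfl, ih _ (by omega) _ p3 rfl, ih _ (by omega) _ p6 rfl]
    exact alt_rec n hn1

-- ===== VERDICT (by name: the statement is the Claim_ definition above) =====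
theorem calculateGrundy_spec : Claim_equal_calculateGrundy := by
  intro n _ hpre
  unfold Spec_calculateGrundy
  exact main_eq n hpre
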